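-- pv_equiv track=rewrite | github.com/tobleron/3T-Bible-Translation-Platform | src/ttt_workbench/commands/open_chat.py | _find_term_diffs
-- ===== SOURCE A (Python) =====
-- def _find_term_diffs(verse_data: dict[str, str], aliases: list[str]) -> list[str]:
--     """Task 006: Find simple term differences between sources for one verse."""
--     if len(aliases) < 2:
--         return []
--     texts = [verse_data.get(a, "") for a in aliases]
--     if len(set(texts)) <= 1:
--         return []
--     diffs = []
--     for i, alias in enumerate(aliases):
--         text = texts[i].lower()
--         for j, other in enumerate(aliases):
--             if i == j:
--                 continue
--             other_text = texts[j].lower()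
--             words_this = set(text.replace(".", "").replace(",", "").replace(";", "").split())
--             words_other = set(other_text.replace(".", "").replace(",", "").replace(";", "").split())
--             unique = words_this - words_other
--             if unique:
--                 sample = ", ".join(sorted(unique)[:3])
--                 diffs.append(f"{alias} has: {sample}")
--     return diffs[:5]
-- ===== SOURCE B (Python) =====
-- def _find_term_diffs(verse_data: dict[str, str], aliases: list[str]) -> list[str]:
--     """Task 006: Find simple term differences between sources for one verse."""
--     if len(aliases) < 2:
--         return []
--     # Inverted index: normalized word -> set of alias indices whose text contains it.
--     term_sources: dict[str, set[int]] = {}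
--     for idx, a in enumerate(aliases):
--         text = verse_data.get(a, "").lower().replace(".", "").replace(",", "").replace(";", "")
--         for w in text.split():
--             term_sources.setdefault(w, set()).add(idx)
--     diffs = []
--     n = len(aliases)
--     for i in range(n):
--         for j in range(n):
--             if i == j:
--                 continue
--             unique = [w for w, owners in term_sources.items() if i in owners and j not in owners]
--             if unique:
--                 diffs.append(f"{aliases[i]} has: " + ", ".join(sorted(unique)[:3]))
--     return diffs[:5]
-- ===== Notes on version B (the rewrite author's own statement) =====
-- stated objective: alternative
-- what changed: B builds an inverted index (a dict mapping each normalized word to the set of alias indices whose text contains it) in one scan of the texts, then answers each ordered pair (i,j) by filtering the index's items for words owned by i but not j, instead of A's per-pair rebuild of both word sets, set subtraction and sort; A's redundant identical-texts guard is dropped.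
import Mathlib
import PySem

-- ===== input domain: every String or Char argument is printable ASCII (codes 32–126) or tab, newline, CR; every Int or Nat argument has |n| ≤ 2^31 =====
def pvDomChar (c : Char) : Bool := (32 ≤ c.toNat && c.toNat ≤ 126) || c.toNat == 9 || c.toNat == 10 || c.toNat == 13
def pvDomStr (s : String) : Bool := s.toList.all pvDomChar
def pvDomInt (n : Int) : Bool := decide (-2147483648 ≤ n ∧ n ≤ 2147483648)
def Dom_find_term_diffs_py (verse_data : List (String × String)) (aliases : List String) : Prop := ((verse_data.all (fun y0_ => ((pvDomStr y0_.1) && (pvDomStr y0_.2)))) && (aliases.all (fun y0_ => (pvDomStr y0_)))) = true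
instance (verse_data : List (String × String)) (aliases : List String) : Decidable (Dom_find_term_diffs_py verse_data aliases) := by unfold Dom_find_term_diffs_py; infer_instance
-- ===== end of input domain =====

-- B builds an inverted index (word -> set of alias indices) in one scan of the texts and
-- answers each ordered pair by filtering the index's items, instead of A's per-pair word-set
-- rebuild and set subtraction; A's redundant identical-texts guard is dropped (return value only).

-- shared normalization: t.replace(".", "").replace(",", "").replace(";", "")
def pvClean (t : String) : String :=
  PySem.Str.replace (PySem.Str.replace (PySem.Str.replace t "." "") "," "") ";" ""

-- ===== PORT A =====
def find_term_diffs_py (verse_data : List (String × String)) (aliases : List String) : List String :=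
  if aliases.length < 2 then []
  else
    let texts := aliases.map (fun a => (PySem.Dict.mk verse_data).getD a "")
    if (PySem.Set.ofList texts).length ≤ 1 then []
    else
      let diffs : List String :=
        (PySem.List.enumerate aliases).foldl (fun diffs p =>
          let i := p.1
          let alias_ := p.2
          let text := PySem.Str.lower (PySem.List.pyGetD texts i "")
          (PySem.List.enumerate aliases).foldl (fun diffs q =>
            let j := q.1
            if i == j then diffs
            else
              let other_text := PySem.Str.lower (PySem.List.pyGetD texts j "")
              let words_this := PySem.Set.ofList (PySem.Str.split₀ (pvClean text))
              let words_other := PySem.Set.ofList (PySem.Str.split₀ (pvClean other_text))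
              let unique := PySem.Set.diff words_this words_other
              if unique.isEmpty then diffs
              else
                let sample := PySem.Str.join ", " ((PySem.List.sorted unique (fun w => w)).take 3)
                diffs ++ [alias_ ++ " has: " ++ sample]) diffs) []
      diffs.take 5

-- ===== PORT B =====
def find_term_diffs_py_alt (verse_data : List (String × String)) (aliases : List String) : List String :=
  if aliases.length < 2 then []
  else
    -- inverted index: normalized word -> set of alias indices whose text contains it
    let term_sources : PySem.Dict String (PySem.Set Int) :=
      (PySem.List.enumerate aliases).foldl (fun d p =>
        let text := pvClean (PySem.Str.lower ((PySem.Dict.mk verse_data).getD p.2 ""))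
        (PySem.Str.split₀ text).foldl (fun d w =>
          d.modify w [] (fun s => PySem.Set.add s p.1)) d) PySem.Dict.empty
    let n := PySem.List.len aliases
    let diffs : List String :=
      (PySem.List.pyRange 0 n 1).foldl (fun diffs i =>
        (PySem.List.pyRange 0 n 1).foldl (fun diffs j =>
          if i == j then diffs
          else
            let unique := (term_sources.items.filter (fun q =>
              PySem.Set.contains q.2 i && !PySem.Set.contains q.2 j)).map (fun q => q.1)
            if unique.isEmpty then diffs
            else diffs ++ [PySem.List.pyGetD aliases i "" ++ " has: " ++
              PySem.Str.join ", " ((PySem.List.sorted unique (fun w => w)).take 3)]) diffs) []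
    diffs.take 5

-- ===== PRECONDITION & SPEC =====
def Spec_find_term_diffs_py (verse_data : List (String × String)) (aliases : List String) (out : List String) : Prop := out = find_term_diffs_py_alt verse_data aliases
instance (verse_data : List (String × String)) (aliases : List String) (out : List String) : Decidable (Spec_find_term_diffs_py verse_data aliases out) := by unfold Spec_find_term_diffs_py; infer_instance

-- ===== CLAIM (what is proved, stated in full; the proofs are below) =====
def Claim_equal_find_term_diffs_py : Prop := ∀ (verse_data : List (String × String)) (aliases : List String), Dom_find_term_diffs_py verse_data aliases → Spec_find_term_diffs_py verse_data aliases (find_term_diffs_py verse_data aliases)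

-- ===== LEMMAS AND PROOFS =====

-- the normalized word list of the text behind an (index, alias) pair / word set of index i
def pvWords (verse_data : List (String × String)) (p : Int × String) : List String :=
  PySem.Str.split₀ (pvClean (PySem.Str.lower ((PySem.Dict.mk verse_data).getD p.2 "")))

def pvW (verse_data : List (String × String)) (aliases : List String) (i : Int) : PySem.Set String :=
  PySem.Set.ofList (pvWords verse_data (i, PySem.List.pyGetD aliases i ""))

def pvSample (verse_data : List (String × String)) (aliases : List String) (i j : Int) : List String :=
  (PySem.List.sorted (PySem.Set.diff (pvW verse_data aliases i) (pvW verse_data aliases j)) (fun w => w)).take 3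

def pvPred (verse_data : List (String × String)) (aliases : List String) (i j : Int) : Bool :=
  !(i == j) && !(pvSample verse_data aliases i j).isEmpty

def pvStr (verse_data : List (String × String)) (aliases : List String) (i j : Int) : String :=
  PySem.List.pyGetD aliases i "" ++ " has: " ++ PySem.Str.join ", " (pvSample verse_data aliases i j)

def pvCanon (verse_data : List (String × String)) (aliases : List String) : List String :=
  ((PySem.List.pyRange 0 (PySem.List.len aliases) 1).flatMap (fun i =>
    ((PySem.List.pyRange 0 (PySem.List.len aliases) 1).filter (pvPred verse_data aliases i)).map
      (pvStr verse_data aliases i))).take 5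

-- the inverted index B builds
def pvTS (verse_data : List (String × String)) (aliases : List String) : PySem.Dict String (PySem.Set Int) :=
  (PySem.List.enumerate aliases).foldl (fun d p =>
    (pvWords verse_data p).foldl (fun d w =>
      d.modify w [] (fun s => PySem.Set.add s p.1)) d) PySem.Dict.empty

theorem pv_diff_empty_iff (vd : List (String × String)) (al : List String) (i j : Int) :
    (PySem.Set.diff (pvW vd al i) (pvW vd al j)).isEmpty = (pvSample vd al i j).isEmpty := by
  unfold pvSample
  rcases h : PySem.Set.diff (pvW vd al i) (pvW vd al j) with _ | ⟨x, l⟩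
  · simp [PySem.List.sorted_eq_nil_iff]
  · have : PySem.List.sorted (x :: l) (fun w => w) ≠ [] := by
      simp [PySem.List.sorted_eq_nil_iff]
    rcases hs : PySem.List.sorted (x :: l) (fun w => w) with _ | ⟨y, m⟩
    · exact absurd hs this
    · simp

theorem pv_texts_getD (vd : List (String × String)) (al : List String) (i : Int)
    (h0 : 0 ≤ i) (h1 : i < (al.length : Int)) :
    PySem.List.pyGetD (al.map (fun a => (PySem.Dict.mk vd).getD a "")) i "" =
    (PySem.Dict.mk vd).getD (PySem.List.pyGetD al i "") "" := by
  rw [PySem.List.pyGetD_eq_getElem _ "" h0 (by simpa using h1),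
      PySem.List.pyGetD_eq_getElem al "" h0 h1]
  simp

-- ---- characterization of the inverted index ----

theorem pv_inner_getD (ws : List String) (d : PySem.Dict String (PySem.Set Int)) (i : Int) (w : String) :
    ((ws.foldl (fun d v => d.modify v [] (fun s => PySem.Set.add s i)) d).getD w []) =
    if w ∈ ws then PySem.Set.add (d.getD w []) i else d.getD w [] := by
  induction ws generalizing d with
  | nil => simp
  | cons v rest ih =>
    simp only [List.foldl_cons, ih, PySem.Dict.getD_modify]
    by_cases hv : w = v
    · by_cases hr : w ∈ rest
      · simp [hv, hr, PySem.Set.add_of_mem (show i ∈ PySem.Set.add (d.getD v []) i by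
          rw [PySem.Set.mem_add]; right; rfl)]
      · simp [hv, hr]
    · by_cases hr : w ∈ rest <;> simp [hv, hr, List.mem_cons]

theorem pv_outer_mem (vd : List (String × String)) (l : List (Int × String))
    (d : PySem.Dict String (PySem.Set Int)) (w : String) (x : Int) :
    (x ∈ (l.foldl (fun d p => (pvWords vd p).foldl (fun d v => d.modify v [] (fun s => PySem.Set.add s p.1)) d) d).getD w []) ↔
    x ∈ d.getD w [] ∨ ∃ p ∈ l, w ∈ pvWords vd p ∧ x = p.1 := by
  induction l generalizing d with
  | nil => simp
  | cons p rest ih =>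
    simp only [List.foldl_cons, ih]
    rw [pv_inner_getD]
    by_cases hw : w ∈ pvWords vd p
    · rw [if_pos hw, PySem.Set.mem_add]
      constructor
      · rintro (h | h)
        · rcases h with h | h
          · exact Or.inl h
          · exact Or.inr ⟨p, List.mem_cons_self, hw, h⟩
        · rcases h with ⟨q, hq, h1, h2⟩
          exact Or.inr ⟨q, List.mem_cons_of_mem _ hq, h1, h2⟩
      · rintro (h | ⟨q, hq, h1, h2⟩)
        · exact Or.inl (Or.inl h)
        · rcases List.mem_cons.1 hq with rfl | hq'
          · exact Or.inl (Or.inr h2)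
          · exact Or.inr ⟨q, hq', h1, h2⟩
    · rw [if_neg hw]
      constructor
      · rintro (h | ⟨q, hq, h1, h2⟩)
        · exact Or.inl h
        · exact Or.inr ⟨q, List.mem_cons_of_mem _ hq, h1, h2⟩
      · rintro (h | ⟨q, hq, h1, h2⟩)
        · exact Or.inl h
        · rcases List.mem_cons.1 hq with rfl | hq'
          · exact absurd h1 hw
          · exact Or.inr ⟨q, hq', h1, h2⟩

theorem pv_outer_keys (vd : List (String × String)) (l : List (Int × String))
    (d : PySem.Dict String (PySem.Set Int)) (w : String) :
    (w ∈ (l.foldl (fun d p => (pvWords vd p).foldl (fun d v => d.modify v [] (fun s => PySem.Set.add s p.1)) d) d).keys) ↔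
    w ∈ d.keys ∨ ∃ p ∈ l, w ∈ pvWords vd p := by
  induction l generalizing d with
  | nil => simp
  | cons p rest ih =>
    simp only [List.foldl_cons, ih]
    rw [PySem.Dict.keys_foldl_modify, PySem.Set.mem_update]
    constructor
    · rintro (h | h)
      · rcases h with h | h
        · exact Or.inl h
        · exact Or.inr ⟨p, List.mem_cons_self, h⟩
      · rcases h with ⟨q, hq, h1⟩
        exact Or.inr ⟨q, List.mem_cons_of_mem _ hq, h1⟩
    · rintro (h | ⟨q, hq, h1⟩)
      · exact Or.inl (Or.inl h)
      · rcases List.mem_cons.1 hq with rfl | hq'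
        · exact Or.inl (Or.inr h1)
        · exact Or.inr ⟨q, hq', h1⟩

theorem pv_outer_nodup (vd : List (String × String)) (l : List (Int × String))
    (d : PySem.Dict String (PySem.Set Int)) (h : d.keys.Nodup) :
    (l.foldl (fun d p => (pvWords vd p).foldl (fun d v => d.modify v [] (fun s => PySem.Set.add s p.1)) d) d).keys.Nodup := by
  induction l generalizing d with
  | nil => exact h
  | cons p rest ih =>
    simp only [List.foldl_cons]
    apply ih
    rw [PySem.Dict.keys_foldl_modify]
    exact PySem.Set.nodup_update _ _ h

theorem pv_mem_enumerate (al : List String) (p : Int × String) :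
    p ∈ PySem.List.enumerate al ↔
    ∃ k ∈ PySem.List.pyRange 0 (PySem.List.len al) 1, p = (k, PySem.List.pyGetD al k "") := by
  rw [PySem.List.enumerate_eq_map_pyRange al "", List.mem_map]
  constructor
  · rintro ⟨k, hk, rfl⟩; exact ⟨k, hk, rfl⟩
  · rintro ⟨k, hk, rfl⟩; exact ⟨k, hk, rfl⟩

-- x owns w in the index  iff  x is an in-range index whose word set contains w
theorem pv_owners_mem (vd : List (String × String)) (al : List String) (w : String) (x : Int) :
    (x ∈ (pvTS vd al).getD w []) ↔
    x ∈ PySem.List.pyRange 0 (PySem.List.len al) 1 ∧ w ∈ pvW vd al x := by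
  rw [pvTS, pv_outer_mem]
  simp only [PySem.Dict.getD_empty, List.not_mem_nil, false_or]
  constructor
  · rintro ⟨p, hp, h1, rfl⟩
    rcases (pv_mem_enumerate al p).1 hp with ⟨k, hk, rfl⟩
    exact ⟨hk, by rw [pvW, PySem.Set.mem_ofList]; exact h1⟩
  · rintro ⟨hx, hw⟩
    refine ⟨(x, PySem.List.pyGetD al x ""), (pv_mem_enumerate al _).2 ⟨x, hx, rfl⟩, ?_, rfl⟩
    rw [pvW, PySem.Set.mem_ofList] at hw
    exact hw

theorem pv_ts_keys_nodup (vd : List (String × String)) (al : List String) :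
    (pvTS vd al).keys.Nodup :=
  pv_outer_nodup vd _ _ (by simp)

def pvUnique (vd : List (String × String)) (al : List String) (i j : Int) : List String :=
  ((pvTS vd al).items.filter (fun q =>
    PySem.Set.contains q.2 i && !PySem.Set.contains q.2 j)).map (fun q => q.1)

theorem pv_unique_nodup (vd : List (String × String)) (al : List String) (i j : Int) :
    (pvUnique vd al i j).Nodup := by
  have h : (pvUnique vd al i j).Sublist ((pvTS vd al).items.map (fun q => q.1)) :=
    List.Sublist.map _ List.filter_sublist
  exact (pv_ts_keys_nodup vd al).sublist h

theorem pv_unique_mem (vd : List (String × String)) (al : List String) (i j : Int)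
    (hi : i ∈ PySem.List.pyRange 0 (PySem.List.len al) 1)
    (hj : j ∈ PySem.List.pyRange 0 (PySem.List.len al) 1) (w : String) :
    w ∈ pvUnique vd al i j ↔ w ∈ PySem.Set.diff (pvW vd al i) (pvW vd al j) := by
  rw [pvUnique, PySem.Set.mem_diff, List.mem_map]
  constructor
  · rintro ⟨⟨k, s⟩, hq, rfl⟩
    rw [List.mem_filter] at hq
    obtain ⟨hitems, hcond⟩ := hq
    have hget : (pvTS vd al).getD k [] = s :=
      PySem.Dict.getD_of_mem_items _ hitems (pv_ts_keys_nodup vd al) []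
    simp only [Bool.and_eq_true, Bool.not_eq_true'] at hcond
    obtain ⟨hci, hcj⟩ := hcond
    constructor
    · have : i ∈ (pvTS vd al).getD k [] := by rw [hget]; exact (PySem.Set.contains_iff _ _).1 hci
      exact ((pv_owners_mem vd al k i).1 this).2
    · intro hjk
      have : j ∈ (pvTS vd al).getD k [] := (pv_owners_mem vd al k j).2 ⟨hj, hjk⟩
      rw [hget, ← PySem.Set.contains_iff _ _] at this
      rw [this] at hcj
      exact absurd hcj (by simp)
  · rintro ⟨hwi, hwj⟩
    have hkeys : w ∈ (pvTS vd al).keys := by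
      rw [pvTS, pv_outer_keys]
      refine Or.inr ⟨(i, PySem.List.pyGetD al i ""), (pv_mem_enumerate al _).2 ⟨i, hi, rfl⟩, ?_⟩
      rw [pvW, PySem.Set.mem_ofList] at hwi
      exact hwi
    rcases hs : (pvTS vd al).get? w with _ | s
    · exact absurd hkeys ((PySem.Dict.get?_eq_none_iff_not_mem_keys _ _).1 hs)
    · have hitems : (w, s) ∈ (pvTS vd al).items := PySem.Dict.mem_items_of_get?_eq_some _ hs
      have hget : (pvTS vd al).getD w [] = s := PySem.Dict.getD_of_get?_eq_some _ [] hs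
      refine ⟨(w, s), ?_, rfl⟩
      rw [List.mem_filter]
      refine ⟨hitems, ?_⟩
      have hci : PySem.Set.contains s i = true := by
        rw [PySem.Set.contains_iff, ← hget]
        exact (pv_owners_mem vd al w i).2 ⟨hi, hwi⟩
      have h1 : i ∈ s := (PySem.Set.contains_iff _ _).1 hci
      have h2 : j ∉ s := by
        intro hm
        have : j ∈ (pvTS vd al).getD w [] := by rw [hget]; exact hm
        exact hwj ((pv_owners_mem vd al w j).1 this).2
      simp [h1, h2]

theorem pv_sorted_unique (vd : List (String × String)) (al : List String) (i j : Int)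
    (hi : i ∈ PySem.List.pyRange 0 (PySem.List.len al) 1)
    (hj : j ∈ PySem.List.pyRange 0 (PySem.List.len al) 1) :
    PySem.List.sorted (pvUnique vd al i j) (fun w => w) =
    PySem.List.sorted (PySem.Set.diff (pvW vd al i) (pvW vd al j)) (fun w => w) := by
  have hndd : (PySem.Set.diff (pvW vd al i) (pvW vd al j)).Nodup :=
    PySem.Set.nodup_diff _ _ (PySem.Set.nodup_ofList _)
  have hperm : (PySem.Set.diff (pvW vd al i) (pvW vd al j)).Perm (pvUnique vd al i j) :=
    (List.perm_ext_iff_of_nodup hndd (pv_unique_nodup vd al i j)).mpr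
      (fun a => (pv_unique_mem vd al i j hi hj a).symm)
  apply PySem.List.sorted_eq_of_perm_of_pairwise_lt
  · exact (PySem.List.sorted_perm (PySem.Set.diff (pvW vd al i) (pvW vd al j)) (fun w => w) false).trans hperm
  · have hle := PySem.List.sorted_pairwise (PySem.Set.diff (pvW vd al i) (pvW vd al j)) (fun w => w)
    have hnd : (PySem.List.sorted (PySem.Set.diff (pvW vd al i) (pvW vd al j)) (fun w => w)).Nodup :=
      ((PySem.List.sorted_perm _ (fun w => w) false).nodup_iff).mpr hndd
    exact (hle.and hnd).imp (fun h => lt_of_le_of_ne h.1 h.2)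

theorem pv_unique_empty (vd : List (String × String)) (al : List String) (i j : Int)
    (hi : i ∈ PySem.List.pyRange 0 (PySem.List.len al) 1)
    (hj : j ∈ PySem.List.pyRange 0 (PySem.List.len al) 1) :
    (pvUnique vd al i j).isEmpty = (pvSample vd al i j).isEmpty := by
  rw [← pv_diff_empty_iff]
  rw [Bool.eq_iff_iff, List.isEmpty_iff, List.isEmpty_iff]
  constructor
  · intro h
    apply List.eq_nil_iff_forall_not_mem.2
    intro w hw
    have := (pv_unique_mem vd al i j hi hj w).2 hw
    rw [h] at this
    exact absurd this (List.not_mem_nil)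
  · intro h
    apply List.eq_nil_iff_forall_not_mem.2
    intro w hw
    have := (pv_unique_mem vd al i j hi hj w).1 hw
    rw [h] at this
    exact absurd this (List.not_mem_nil)

-- ---- A equals the canonical form ----

theorem pv_A_eq_canon (vd : List (String × String)) (al : List String)
    (hg : ¬ (PySem.Set.ofList (al.map (fun a => (PySem.Dict.mk vd).getD a ""))).length ≤ 1)
    (h2 : ¬ al.length < 2) :
    find_term_diffs_py vd al = pvCanon vd al := by
  unfold find_term_diffs_py pvCanon
  rw [if_neg h2, if_neg hg]
  rw [PySem.List.enumerate_eq_map_pyRange al "", List.foldl_map]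
  have hR : ∀ i ∈ PySem.List.pyRange 0 (PySem.List.len al) 1, 0 ≤ i ∧ i < (al.length : Int) := by
    intro i hi
    simpa [PySem.List.len_eq] using PySem.List.mem_pyRange_one.1 hi
  have hbody : ∀ (acc : List String), ∀ i ∈ PySem.List.pyRange 0 (PySem.List.len al) 1,
      ((PySem.List.pyRange 0 (PySem.List.len al) 1).map (fun j => (j, PySem.List.pyGetD al j ""))).foldl
        (fun diffs (q : Int × String) =>
        if i == q.1 then diffs
        else
          if (PySem.Set.diff
              (PySem.Set.ofList (PySem.Str.split₀ (pvClean (PySem.Str.lower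
                (PySem.List.pyGetD (al.map (fun a => (PySem.Dict.mk vd).getD a "")) i "")))))
              (PySem.Set.ofList (PySem.Str.split₀ (pvClean (PySem.Str.lower
                (PySem.List.pyGetD (al.map (fun a => (PySem.Dict.mk vd).getD a "")) q.1 "")))))).isEmpty
          then diffs
          else diffs ++ [PySem.List.pyGetD al i "" ++ " has: " ++ PySem.Str.join ", "
            ((PySem.List.sorted (PySem.Set.diff
              (PySem.Set.ofList (PySem.Str.split₀ (pvClean (PySem.Str.lower
                (PySem.List.pyGetD (al.map (fun a => (PySem.Dict.mk vd).getD a "")) i "")))))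
              (PySem.Set.ofList (PySem.Str.split₀ (pvClean (PySem.Str.lower
                (PySem.List.pyGetD (al.map (fun a => (PySem.Dict.mk vd).getD a "")) q.1 ""))))))
              (fun w => w)).take 3)]) acc
      = acc ++ ((PySem.List.pyRange 0 (PySem.List.len al) 1).filter (pvPred vd al i)).map (pvStr vd al i) := by
    intro acc i hi
    obtain ⟨hi0, hi1⟩ := hR i hi
    rw [List.foldl_map]
    rw [PySem.List.foldl_congr_mem _ _ (fun diffs j =>
        if pvPred vd al i j then diffs ++ [pvStr vd al i j] else diffs) acc ?_]
    · exact PySem.List.foldl_append_if (pvPred vd al i) (pvStr vd al i) _ acc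
    · intro acc' j hj
      obtain ⟨hj0, hj1⟩ := hR j hj
      dsimp only
      have hwi : PySem.Set.ofList (PySem.Str.split₀ (pvClean (PySem.Str.lower
          (PySem.List.pyGetD (al.map (fun a => (PySem.Dict.mk vd).getD a "")) i "")))) = pvW vd al i := by
        rw [pv_texts_getD vd al i hi0 hi1]; rfl
      have hwj : PySem.Set.ofList (PySem.Str.split₀ (pvClean (PySem.Str.lower
          (PySem.List.pyGetD (al.map (fun a => (PySem.Dict.mk vd).getD a "")) j "")))) = pvW vd al j := by
        rw [pv_texts_getD vd al j hj0 hj1]; rfl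
      rw [hwi, hwj]
      by_cases hij : i = j
      · have hp : pvPred vd al i j = false := by simp [pvPred, hij]
        rw [if_pos (by simp [hij]), hp]
        simp
      · have hbe : (i == j) = false := by simpa using hij
        rw [if_neg (by simp [hbe]), pv_diff_empty_iff]
        cases hcase : (pvSample vd al i j).isEmpty with
        | true =>
          have hp : pvPred vd al i j = false := by simp [pvPred, hcase]
          rw [if_pos rfl, hp]
          simp
        | false =>
          have hp : pvPred vd al i j = true := by rw [pvPred, hbe, hcase]; rfl
          rw [if_neg (by simp), hp, if_pos rfl]
          rfl
  rw [PySem.List.foldl_congr_mem _ _ (fun diffs i =>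
      diffs ++ ((PySem.List.pyRange 0 (PySem.List.len al) 1).filter (pvPred vd al i)).map (pvStr vd al i)) [] ?_]
  · rw [PySem.List.foldl_append_eq_flatMap]; rfl
  · intro acc i hi
    dsimp only
    exact hbody acc i hi

-- ---- B equals the canonical form ----

theorem pv_B_eq_canon (vd : List (String × String)) (al : List String)
    (h2 : ¬ al.length < 2) :
    find_term_diffs_py_alt vd al = pvCanon vd al := by
  have hdef : find_term_diffs_py_alt vd al =
      (if al.length < 2 then []
       else
        ((PySem.List.pyRange 0 (PySem.List.len al) 1).foldl (fun diffs i =>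
          (PySem.List.pyRange 0 (PySem.List.len al) 1).foldl (fun diffs j =>
            if i == j then diffs
            else
              if (pvUnique vd al i j).isEmpty then diffs
              else diffs ++ [PySem.List.pyGetD al i "" ++ " has: " ++
                PySem.Str.join ", " ((PySem.List.sorted (pvUnique vd al i j) (fun w => w)).take 3)]) diffs) []).take 5) := rfl
  rw [hdef, if_neg h2]
  unfold pvCanon
  have hbody : ∀ (acc : List String), ∀ i ∈ PySem.List.pyRange 0 (PySem.List.len al) 1,
      (PySem.List.pyRange 0 (PySem.List.len al) 1).foldl (fun diffs j =>
        if i == j then diffs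
        else
          if (pvUnique vd al i j).isEmpty then diffs
          else diffs ++ [PySem.List.pyGetD al i "" ++ " has: " ++
            PySem.Str.join ", " ((PySem.List.sorted (pvUnique vd al i j) (fun w => w)).take 3)]) acc
      = acc ++ ((PySem.List.pyRange 0 (PySem.List.len al) 1).filter (pvPred vd al i)).map (pvStr vd al i) := by
    intro acc i hi
    rw [PySem.List.foldl_congr_mem _ _ (fun diffs j =>
        if pvPred vd al i j then diffs ++ [pvStr vd al i j] else diffs) acc ?_]
    · exact PySem.List.foldl_append_if (pvPred vd al i) (pvStr vd al i) _ acc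
    · intro acc' j hj
      dsimp only
      by_cases hij : i = j
      · have hp : pvPred vd al i j = false := by simp [pvPred, hij]
        rw [if_pos (by simp [hij]), hp]
        simp
      · have hbe : (i == j) = false := by simpa using hij
        rw [if_neg (by simp [hbe]), pv_unique_empty vd al i j hi hj]
        cases hcase : (pvSample vd al i j).isEmpty with
        | true =>
          have hp : pvPred vd al i j = false := by simp [pvPred, hcase]
          rw [if_pos rfl, hp]
          simp
        | false =>
          have hp : pvPred vd al i j = true := by rw [pvPred, hbe, hcase]; rfl
          rw [if_neg (by simp), hp, if_pos rfl, pv_sorted_unique vd al i j hi hj]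
          rfl
  rw [PySem.List.foldl_congr_mem _ _ (fun diffs i =>
      diffs ++ ((PySem.List.pyRange 0 (PySem.List.len al) 1).filter (pvPred vd al i)).map (pvStr vd al i)) [] ?_]
  · rw [PySem.List.foldl_append_eq_flatMap]; rfl
  · intro acc i hi
    dsimp only
    exact hbody acc i hi

-- ---- when all texts coincide, the canonical form is empty (covers A's early guard) ----

theorem pv_canon_nil (vd : List (String × String)) (al : List String)
    (hg : (PySem.Set.ofList (al.map (fun a => (PySem.Dict.mk vd).getD a ""))).length ≤ 1) :
    pvCanon vd al = [] := by
  set texts := al.map (fun a => (PySem.Dict.mk vd).getD a "") with htexts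
  have hall : ∀ x ∈ texts, ∀ y ∈ texts, x = y := by
    intro x hx y hy
    have hx' := (PySem.Set.mem_ofList texts x).mpr hx
    have hy' := (PySem.Set.mem_ofList texts y).mpr hy
    rcases h : PySem.Set.ofList texts with _ | ⟨a, l⟩
    · rw [h] at hx'; simp at hx'
    · have hl : l = [] := by
        rw [h] at hg; simpa using hg
      rw [h, hl] at hx' hy'
      simp at hx' hy'; rw [hx', hy']
  have hW : ∀ i ∈ PySem.List.pyRange 0 (PySem.List.len al) 1,
      ∀ j ∈ PySem.List.pyRange 0 (PySem.List.len al) 1, pvW vd al i = pvW vd al j := by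
    intro i hi j hj
    obtain ⟨hi0, hi1⟩ : 0 ≤ i ∧ i < (al.length : Int) := by
      simpa [PySem.List.len_eq] using PySem.List.mem_pyRange_one.1 hi
    obtain ⟨hj0, hj1⟩ : 0 ≤ j ∧ j < (al.length : Int) := by
      simpa [PySem.List.len_eq] using PySem.List.mem_pyRange_one.1 hj
    have hti : (PySem.Dict.mk vd).getD (PySem.List.pyGetD al i "") "" = PySem.List.pyGetD texts i "" :=
      (pv_texts_getD vd al i hi0 hi1).symm
    have htj : (PySem.Dict.mk vd).getD (PySem.List.pyGetD al j "") "" = PySem.List.pyGetD texts j "" :=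
      (pv_texts_getD vd al j hj0 hj1).symm
    have hmi : PySem.List.pyGetD texts i "" ∈ texts :=
      PySem.List.pyGetD_mem texts "" (by simp only [htexts, PySem.Raise.InRange, List.length_map]; omega)
    have hmj : PySem.List.pyGetD texts j "" ∈ texts :=
      PySem.List.pyGetD_mem texts "" (by simp only [htexts, PySem.Raise.InRange, List.length_map]; omega)
    unfold pvW pvWords
    rw [hti, htj, hall _ hmi _ hmj]
  have hpred : ∀ i ∈ PySem.List.pyRange 0 (PySem.List.len al) 1,
      ∀ j ∈ PySem.List.pyRange 0 (PySem.List.len al) 1, pvPred vd al i j = false := by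
    intro i hi j hj
    have hdiff : PySem.Set.diff (pvW vd al i) (pvW vd al j) = [] := by
      apply List.eq_nil_iff_forall_not_mem.2
      intro w hw
      rw [PySem.Set.mem_diff, hW i hi j hj] at hw
      exact hw.2 hw.1
    have hs : pvSample vd al i j = [] := by
      unfold pvSample
      rw [hdiff]
      simp [PySem.List.sorted_eq_nil_iff]
    simp [pvPred, hs]
  unfold pvCanon
  have : (PySem.List.pyRange 0 (PySem.List.len al) 1).flatMap (fun i =>
      ((PySem.List.pyRange 0 (PySem.List.len al) 1).filter (pvPred vd al i)).map (pvStr vd al i)) = [] := by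
    rw [List.flatMap_eq_nil_iff]
    intro i hi
    have : (PySem.List.pyRange 0 (PySem.List.len al) 1).filter (pvPred vd al i) = [] := by
      rw [List.filter_eq_nil_iff]
      intro j hj
      simp [hpred i hi j hj]
    rw [this]; rfl
  rw [this]; rfl

-- ===== VERDICT (by name: the statement is the Claim_ definition above) =====
theorem find_term_diffs_py_spec : Claim_equal_find_term_diffs_py := by
  intro vd al _
  unfold Spec_find_term_diffs_py
  by_cases h2 : al.length < 2
  · unfold find_term_diffs_py find_term_diffs_py_alt
    rw [if_pos h2, if_pos h2]
  · by_cases hg : (PySem.Set.ofList (al.map (fun a => (PySem.Dict.mk vd).getD a ""))).length ≤ 1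
    · rw [pv_B_eq_canon vd al h2, pv_canon_nil vd al hg]
      unfold find_term_diffs_py
      rw [if_neg h2, if_pos hg]
    · rw [pv_A_eq_canon vd al hg h2, pv_B_eq_canon vd al h2]
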